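-- pv_equiv track=rewrite | github.com/tommyasni08/Fraud-Projects | Quick Python Practice/dedup_linkage.py | shared_bank_pairs
-- ===== SOURCE A (Python) =====
-- from collections import defaultdict
-- from itertools import combinations
--
-- def shared_bank_pairs(rows):
--     by = defaultdict(list)
--     for r in rows: by[r["bank"]].append(r["user"])
--     pairs = set()
--     for users in by.values():
--         users = sorted(set(users))
--         for a, b in combinations(users, 2):
--             pairs.add((a, b))
--     return pairs
-- ===== SOURCE B (Python) =====
-- def _pairs(users):
--     if not users:
--         return []
--     head, rest = users[0], users[1:]
--     return [(head, v) for v in rest] + _pairs(rest)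
--
-- def shared_bank_pairs(rows):
--     out = []
--     for bank in dict.fromkeys(r["bank"] for r in rows):
--         users = sorted({r["user"] for r in rows if r["bank"] == bank})
--         out += _pairs(users)
--     return set(out)
-- ===== Notes on version B (the rewrite author's own statement) =====
-- stated objective: alternative
-- what changed: Replaces the defaultdict grouping + itertools.combinations + incremental set accumulation with a different decomposition: dedup the banks in first-appearance order, gather each bank's users by filtering the rows, emit the ordered pairs by a structural recursion on the sorted user list, and build the result set once at the end.
import Mathlib
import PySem

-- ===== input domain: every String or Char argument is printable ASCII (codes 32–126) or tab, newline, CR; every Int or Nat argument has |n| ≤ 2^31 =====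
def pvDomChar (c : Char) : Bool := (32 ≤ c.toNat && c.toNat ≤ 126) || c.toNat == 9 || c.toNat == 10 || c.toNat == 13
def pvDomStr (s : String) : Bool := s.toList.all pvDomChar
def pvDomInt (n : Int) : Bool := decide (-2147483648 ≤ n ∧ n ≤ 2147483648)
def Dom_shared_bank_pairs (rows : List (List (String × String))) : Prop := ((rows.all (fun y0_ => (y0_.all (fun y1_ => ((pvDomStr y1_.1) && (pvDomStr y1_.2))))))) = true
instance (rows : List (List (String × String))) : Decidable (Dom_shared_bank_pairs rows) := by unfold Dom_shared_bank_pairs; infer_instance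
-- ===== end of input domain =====

-- ===== PORT A =====
-- B changes the decomposition (bank dedup + per-bank filter + structural pair recursion +
-- one final set build, instead of defaultdict grouping + combinations + incremental set adds);
-- Pre_ excludes rows missing a "bank" or "user" key, where the Python A raises KeyError.

-- r[k] on a row dict (assoc list, first match); total with default "", used only under Pre_
def pvRowGet (r : List (String × String)) (k : String) : String :=
  ((r.find? (fun p => p.1 == k)).map Prod.snd).getD ""

def shared_bank_pairs (rows : List (List (String × String))) : List (String × String) :=
  -- by = defaultdict(list); for r in rows: by[r["bank"]].append(r["user"])
  -- for users in by.values(): users = sorted(set(users)); for a, b in combinations(users, 2): pairs.add((a, b))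
  ((rows.foldl (fun d r => d.modify (pvRowGet r "bank") [] (fun v => v ++ [pvRowGet r "user"]))
      PySem.Dict.empty).values).foldl
    (fun pairs users =>
      (PySem.List.combinations (PySem.List.sorted (PySem.Set.ofList users) (fun x => x) false) 2).foldl
        (fun pairs c =>
          match c with
          | [a, b] => PySem.Set.add pairs (a, b)
          | _ => pairs)
        pairs)
    PySem.Set.empty

-- ===== PORT B =====
-- _pairs(users): structural recursion emitting (head, v) for each later v
def pvPairsRec : List String → List (String × String)
  | [] => []
  | h :: t => t.map (fun v => (h, v)) ++ pvPairsRec t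

def shared_bank_pairs_alt (rows : List (List (String × String))) : List (String × String) :=
  -- for bank in dict.fromkeys(...): users = sorted({...}); out += _pairs(users);  return set(out)
  PySem.Set.ofList
    ((PySem.List.dedup (rows.map (fun r => pvRowGet r "bank"))).foldl
      (fun out bank =>
        out ++
          pvPairsRec
            (PySem.List.sorted
              (PySem.Set.ofList
                ((rows.filter (fun r => pvRowGet r "bank" == bank)).map
                  (fun r => pvRowGet r "user")))
              (fun x => x) false))
      [])

-- ===== PRECONDITION & SPEC =====
-- Pre_: every row has both a "bank" and a "user" key; on a row missing one, A raises KeyError.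
def Pre_shared_bank_pairs (rows : List (List (String × String))) : Prop :=
  (rows.all (fun r => r.any (fun p => p.1 == "bank") && r.any (fun p => p.1 == "user"))) = true
instance (rows : List (List (String × String))) : Decidable (Pre_shared_bank_pairs rows) := by
  unfold Pre_shared_bank_pairs; infer_instance
def pvWitness_shared_bank_pairs : (List (List (String × String))) :=
  [[("bank", "b1"), ("user", "u1")], [("bank", "b1"), ("user", "u2")]]

def Spec_shared_bank_pairs (rows : List (List (String × String))) (out : List (String × String)) : Prop := out = shared_bank_pairs_alt rows
instance (rows : List (List (String × String))) (out : List (String × String)) : Decidable (Spec_shared_bank_pairs rows out) := by unfold Spec_shared_bank_pairs; infer_instance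

-- ===== CLAIM (what is proved, stated in full; the proofs are below) =====
def Claim_equal_shared_bank_pairs : Prop := ∀ (rows : List (List (String × String))), Dom_shared_bank_pairs rows → Pre_shared_bank_pairs rows → Spec_shared_bank_pairs rows (shared_bank_pairs rows)

-- ===== LEMMAS AND PROOFS =====

-- combinations(xs, 2) is pvPairsRec xs rendered as 2-element lists
lemma pv_comb2 (xs : List String) :
    PySem.List.combinations xs 2 = (pvPairsRec xs).map (fun p => [p.1, p.2]) := by
  induction xs with
  | nil => rfl
  | cons x t ih =>
      simp [PySem.List.combinations_cons_succ, PySem.List.combinations_one, ih,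
        pvPairsRec, List.map_map, Function.comp]

-- A's inner 'for a, b in combinations(users, 2): pairs.add((a, b))' is a Set.add fold of pvPairsRec
lemma pv_foldl_madd (xs : List String) (s : PySem.Set (String × String)) :
    (PySem.List.combinations xs 2).foldl
        (fun pairs c =>
          match c with
          | [a, b] => PySem.Set.add pairs (a, b)
          | _ => pairs) s
      = (pvPairsRec xs).foldl PySem.Set.add s := by
  rw [pv_comb2, List.foldl_map]

-- folding Set.add over each g x in turn is one Set.update of the flattened list
lemma pv_foldl_update {α : Type} (g : α → List (String × String)) (l : List α)
    (s : PySem.Set (String × String)) :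
    l.foldl (fun s x => (g x).foldl PySem.Set.add s) s
      = PySem.Set.update s (l.flatMap g) := by
  induction l generalizing s with
  | nil => simp [PySem.Set.update]
  | cons h t ih => simp [ih, PySem.Set.update, List.foldl_append]

-- the values of A's grouping dict are the per-bank filtered user lists, banks deduped in order
lemma pv_values_grouping (rows : List (List (String × String))) :
    (rows.foldl
        (fun d r => d.modify (pvRowGet r "bank") [] (fun v => v ++ [pvRowGet r "user"]))
        PySem.Dict.empty).values
      = (PySem.Set.ofList (rows.map (fun r => pvRowGet r "bank"))).map
          (fun b => (rows.filter (fun r => pvRowGet r "bank" == b)).map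
            (fun r => pvRowGet r "user")) := by
  have hkeys :
      (rows.foldl
          (fun d r => d.modify (pvRowGet r "bank") [] (fun v => v ++ [pvRowGet r "user"]))
          PySem.Dict.empty).keys
        = PySem.Set.ofList (rows.map (fun r => pvRowGet r "bank")) := by
    rw [PySem.Dict.keys_foldl_modify_key rows (fun r => pvRowGet r "bank") []
      (fun _ r => fun v => v ++ [pvRowGet r "user"]) PySem.Dict.empty]
    simp [PySem.Dict.keys_empty, PySem.Set.update, ← PySem.Set.ofList_eq_foldl]
  have hnd :
      (rows.foldl
          (fun d r => d.modify (pvRowGet r "bank") [] (fun v => v ++ [pvRowGet r "user"]))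
          PySem.Dict.empty).keys.Nodup := by
    exact PySem.Dict.nodup_keys_foldl_modify_key rows (fun r => pvRowGet r "bank") []
      (fun _ r => fun v => v ++ [pvRowGet r "user"]) PySem.Dict.empty
      (by simp [PySem.Dict.keys_empty])
  rw [PySem.Dict.values_eq_map_keys _ hnd [], hkeys]
  refine List.map_congr_left (fun b _ => ?_)
  have hfold :
      rows.foldl
          (fun d r => d.modify (pvRowGet r "bank") [] (fun v => v ++ [pvRowGet r "user"]))
          PySem.Dict.empty
        = (rows.map (fun r => (pvRowGet r "bank", pvRowGet r "user"))).foldl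
            (fun d p => d.modify p.1 [] (fun v => v ++ [p.2])) PySem.Dict.empty := by
    rw [List.foldl_map]
  rw [hfold, PySem.Dict.getD_foldl_modify_append]
  simp [List.filter_map, List.map_map, Function.comp_def]

theorem pv_main (rows : List (List (String × String))) :
    shared_bank_pairs rows = shared_bank_pairs_alt rows := by
  unfold shared_bank_pairs shared_bank_pairs_alt
  rw [pv_values_grouping]
  have hstep :
      ∀ (s : PySem.Set (String × String)) (users : List String),
        (PySem.List.combinations
            (PySem.List.sorted (PySem.Set.ofList users) (fun x => x) false) 2).foldl
          (fun pairs c =>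
            match c with
            | [a, b] => PySem.Set.add pairs (a, b)
            | _ => pairs) s
        = (pvPairsRec (PySem.List.sorted (PySem.Set.ofList users) (fun x => x) false)).foldl
            PySem.Set.add s := fun s users => pv_foldl_madd _ s
  simp only [hstep]
  rw [List.foldl_map
    (f := fun b => (rows.filter (fun r => pvRowGet r "bank" == b)).map (fun r => pvRowGet r "user"))]
  rw [pv_foldl_update
    (g := fun b => pvPairsRec (PySem.List.sorted
      (PySem.Set.ofList ((rows.filter (fun r => pvRowGet r "bank" == b)).map
        (fun r => pvRowGet r "user"))) (fun x => x) false))]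
  rw [PySem.List.foldl_append_eq_flatMap]
  simp [PySem.Set.empty, PySem.Set.update, PySem.List.dedup, PySem.Set.ofList_eq_foldl]

-- ===== VERDICT (by name: the statement is the Claim_ definition above) =====
theorem shared_bank_pairs_spec : Claim_equal_shared_bank_pairs := by
  intro rows _ _
  unfold Spec_shared_bank_pairs
  exact pv_main rows
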